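-- pv_equiv track=rewrite | github.com/kavinravi/foundation_project | parse_foundation_data.py | determine_type_and_note
-- ===== SOURCE A (Python) =====
-- TYPE_MARKERS = {"price", "signal"}
--
-- def determine_type_and_note(rows: list[list[str]], col_offset: int) -> tuple[str, str | None]:
--     """Inspect the leftmost column of each block to find ``Price``/``Signal``
--     and any extra annotation (e.g. ``Agg Bonds``)."""
--     type_label: str | None = None
--     note: str | None = None
--     for row in rows[1:]:
--         cell = row[col_offset].strip() if col_offset < len(row) else ""
--         if not cell:
--             continue
--         lowered = cell.lower()
--         if lowered in TYPE_MARKERS and type_label is None: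
--             type_label = cell.capitalize()
--         elif lowered not in TYPE_MARKERS and note is None:
--             note = cell
--         if type_label and note:
--             break
--     return type_label or "Price", note
-- ===== SOURCE B (Python) =====
-- TYPE_MARKERS = {"price", "signal"}
--
-- def determine_type_and_note(rows: list[list[str]], col_offset: int) -> tuple[str, str | None]:
--     # One pass collecting non-empty stripped cells, then two independent
--     # first-match searches instead of the interleaved early-exit loop.
--     cells = []
--     for row in rows[1:]:
--         cell = row[col_offset].strip() if col_offset < len(row) else ""
--         if cell:
--             cells.append(cell)
--     type_label = next((c.capitalize() for c in cells if c.lower() in TYPE_MARKERS), None)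
--     note = next((c for c in cells if c.lower() not in TYPE_MARKERS), None)
--     return type_label or "Price", note
-- ===== Notes on version B (the rewrite author's own statement) =====
-- stated objective: simpler
-- what changed: Replaced the interleaved early-exit loop maintaining two optional accumulators with a precomputed list of non-empty stripped cells and two independent first-match searches (first marker cell, first non-marker cell).
-- outside the precondition, e.g. on determine_type_and_note([[], ['price'], ['note'], []], -1): A returns ('Price', 'note'), B raises IndexError
import Mathlib
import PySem

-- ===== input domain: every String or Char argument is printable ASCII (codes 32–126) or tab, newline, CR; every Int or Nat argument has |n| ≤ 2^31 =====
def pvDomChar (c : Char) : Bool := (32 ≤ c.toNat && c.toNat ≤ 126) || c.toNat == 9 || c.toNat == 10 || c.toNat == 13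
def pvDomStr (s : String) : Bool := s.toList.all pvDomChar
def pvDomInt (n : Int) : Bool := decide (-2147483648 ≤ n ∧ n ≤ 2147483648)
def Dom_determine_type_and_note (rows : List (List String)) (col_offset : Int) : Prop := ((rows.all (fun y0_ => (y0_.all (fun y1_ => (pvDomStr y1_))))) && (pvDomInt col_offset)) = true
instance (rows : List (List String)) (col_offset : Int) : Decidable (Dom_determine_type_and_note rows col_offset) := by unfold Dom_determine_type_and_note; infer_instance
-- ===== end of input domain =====

-- B replaces A's interleaved early-exit loop by a precomputed cell list and two
-- independent first-match searches; equal return value on Pre_ (where no cell access raises).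

-- ===== PORT A =====
-- TYPE_MARKERS = {"price", "signal"}
def pvMarkers : PySem.Set String := PySem.Set.ofList ["price", "signal"]

-- str.capitalize(): first char uppercased, the rest lowercased (exact on ASCII)
def pvCapitalize (s : String) : String :=
  match s.toList with
  | [] => ""
  | c :: rest => String.ofList (PySem.Chars.upperChar c :: PySem.Chars.lower rest)

-- the cell expression: row[col_offset].strip() if col_offset < len(row) else ""
-- (pyGet? … getD "" : under Pre_ the access is in range, so the default is never used)
def pvCell (row : List String) (col_offset : Int) : String :=
  if col_offset < (row.length : Int) then
    PySem.Str.strip ((PySem.List.pyGet? row col_offset).getD "")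
  else ""

-- A's loop over rows[1:] carrying (type_label, note); the break returns early.
-- (`if type_label and note` : both strings are non-empty whenever set, so truthiness = isSome)
def pvARec (col_offset : Int) (rs : List (List String)) (t n : Option String) :
    Option String × Option String :=
  match rs with
  | [] => (t, n)
  | row :: rest =>
    let cell := pvCell row col_offset
    if cell = "" then pvARec col_offset rest t n
    else
      let lowered := PySem.Str.lower cell
      let t' := if pvMarkers.contains lowered ∧ t = none then some (pvCapitalize cell) else t
      let n' := if ¬ pvMarkers.contains lowered ∧ n = none then some cell else n
      if t'.isSome ∧ n'.isSome then (t', n') else pvARec col_offset rest t' n'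

def determine_type_and_note (rows : List (List String)) (col_offset : Int) : String × Option String :=
  let r := pvARec col_offset (rows.drop 1) none none
  -- `type_label or "Price"`
  ((match r.1 with | none => "Price" | some s => if s = "" then "Price" else s), r.2)

-- ===== PORT B =====
def determine_type_and_note_alt (rows : List (List String)) (col_offset : Int) : String × Option String :=
  let cells := ((rows.drop 1).map (fun row => pvCell row col_offset)).filter (fun c => c ≠ "")
  let type_label := (cells.find? (fun c => pvMarkers.contains (PySem.Str.lower c))).map pvCapitalize
  let note := cells.find? (fun c => ! pvMarkers.contains (PySem.Str.lower c))
  ((match type_label with | none => "Price" | some s => if s = "" then "Price" else s), note)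

-- ===== PRECONDITION & SPEC =====
-- Pre_ excludes inputs where some inspected cell access row[col_offset] raises IndexError
-- (negative col_offset beyond a row's length while passing the `col_offset < len(row)` guard):
-- there A either raises too, or — only when its break fires before the bad row — returns while B raises.
def Pre_determine_type_and_note (rows : List (List String)) (col_offset : Int) : Prop :=
  ∀ row ∈ rows.drop 1, col_offset < (row.length : Int) → -(row.length : Int) ≤ col_offset

instance (rows : List (List String)) (col_offset : Int) : Decidable (Pre_determine_type_and_note rows col_offset) := by unfold Pre_determine_type_and_note; infer_instance

def pvWitness_determine_type_and_note : List (List String) × Int := ([["hdr"], ["price"], ["Agg Bonds"]], 0)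

def Spec_determine_type_and_note (rows : List (List String)) (col_offset : Int) (out : String × Option String) : Prop := out = determine_type_and_note_alt rows col_offset
instance (rows : List (List String)) (col_offset : Int) (out : String × Option String) : Decidable (Spec_determine_type_and_note rows col_offset out) := by unfold Spec_determine_type_and_note; infer_instance

-- ===== CLAIM (what is proved, stated in full; the proofs are below) =====
def Claim_equal_determine_type_and_note : Prop := ∀ (rows : List (List String)) (col_offset : Int), Dom_determine_type_and_note rows col_offset → Pre_determine_type_and_note rows col_offset → Spec_determine_type_and_note rows col_offset (determine_type_and_note rows col_offset)

-- ===== LEMMAS AND PROOFS =====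

-- Loop characterisation: A's loop returns its accumulators or-else B's two first-match searches.
theorem pvARec_eq (col_offset : Int) (rs : List (List String)) (t n : Option String) :
    pvARec col_offset rs t n =
      (t.or ((((rs.map (fun row => pvCell row col_offset)).filter (fun c => c ≠ "")).find?
              (fun c => pvMarkers.contains (PySem.Str.lower c))).map pvCapitalize),
       n.or (((rs.map (fun row => pvCell row col_offset)).filter (fun c => c ≠ "")).find?
              (fun c => ! pvMarkers.contains (PySem.Str.lower c)))) := by
  induction rs generalizing t n with
  | nil => simp [pvARec]
  | cons row rest ih =>
    show pvARec col_offset (row :: rest) t n = _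
    unfold pvARec
    by_cases hc : pvCell row col_offset = ""
    · rw [if_pos hc, ih]
      simp [hc]
    · rw [if_neg hc]
      have hfil : ((row :: rest).map (fun r => pvCell r col_offset)).filter (fun c => c ≠ "") =
          pvCell row col_offset ::
            ((rest.map (fun r => pvCell r col_offset)).filter (fun c => c ≠ "")) := by
        simp [hc]
      rw [hfil]
      by_cases hm : PySem.Str.lower (pvCell row col_offset) ∈ pvMarkers
      · cases t <;> cases n <;> simp [hm, ih]
      · cases t <;> cases n <;> simp [hm, ih]

-- ===== VERDICT (by name: the statement is the Claim_ definition above) =====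
theorem determine_type_and_note_spec : Claim_equal_determine_type_and_note := by
  intro rows col_offset _ _
  unfold Spec_determine_type_and_note determine_type_and_note determine_type_and_note_alt
  rw [pvARec_eq]
  simp
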